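-- pv_equiv track=rewrite | github.com/Tsun0193/nxGREG | parsing/context.py | _extract_node_label
-- ===== SOURCE A (Python) =====
-- from typing import Dict, List, Optional, Set, Tuple
--
-- def _extract_node_label(remainder: str) -> Optional[str]:
--     if not remainder:
--         return None
--     text = remainder.strip()
--     if not text:
--         return None
--     if ":::" in text:
--         text = text.split(":::", 1)[0].strip()
--     shapes = [
--         ("[[", "]]"),
--         ("((", "))"),
--         ("[", "]"),
--         ("(", ")"),
--         ("{", "}"),
--         ("<", ">"),
--     ]
--     matched = False
--     while True:
--         for start, end in shapes:
--             if (
--                 text.startswith(start)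
--                 and text.endswith(end)
--                 and len(text) >= len(start) + len(end)
--             ):
--                 text = text[len(start) : -len(end)].strip()
--                 matched = True
--                 break
--         else:
--             break
--     if not matched:
--         return None
--     if text.startswith('"') and text.endswith('"') and len(text) >= 2:
--         text = text[1:-1].strip()
--     return text or None
-- ===== SOURCE B (Python) =====
-- from typing import Optional
--
-- _PAIRS = (("[", "]"), ("(", ")"), ("{", "}"), ("<", ">"))
--
--
-- def _peel_once(s: str) -> Optional[str]:
--     if len(s) >= 4 and (s[:2], s[-2:]) in (("[[", "]]"), ("((", "))")):
--         return s[2:-2].strip()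
--     if len(s) >= 2 and (s[0], s[-1]) in _PAIRS:
--         return s[1:-1].strip()
--     return None
--
--
-- def _peel(s: str) -> str:
--     nxt = _peel_once(s)
--     return s if nxt is None else _peel(nxt)
--
--
-- def _unquote(s: str) -> str:
--     if len(s) >= 2 and s[0] == '"' and s[-1] == '"':
--         return s[1:-1].strip()
--     return s
--
--
-- def _extract_node_label(remainder: str) -> Optional[str]:
--     text = remainder.strip()
--     if not text:
--         return None
--     if ":::" in text:
--         text = text.split(":::", 1)[0].strip()
--     peeled = _peel(text)
--     if peeled == text:
--         return None
--     peeled = _unquote(peeled)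
--     return peeled or None
-- ===== Notes on version B (the rewrite author's own statement) =====
-- stated objective: alternative
-- what changed: Replaced A's while-True loop scanning a six-entry (open, close) string-pair table with a matched flag and for-else by direct first/last-character tests: a _peel_once step that checks the two double shapes via s[:2]/s[-2:] and looks (s[0], s[-1]) up in a pair table, a recursive _peel, and matched recovered as peeled != text (valid since every strip shortens the string).
import Mathlib
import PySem

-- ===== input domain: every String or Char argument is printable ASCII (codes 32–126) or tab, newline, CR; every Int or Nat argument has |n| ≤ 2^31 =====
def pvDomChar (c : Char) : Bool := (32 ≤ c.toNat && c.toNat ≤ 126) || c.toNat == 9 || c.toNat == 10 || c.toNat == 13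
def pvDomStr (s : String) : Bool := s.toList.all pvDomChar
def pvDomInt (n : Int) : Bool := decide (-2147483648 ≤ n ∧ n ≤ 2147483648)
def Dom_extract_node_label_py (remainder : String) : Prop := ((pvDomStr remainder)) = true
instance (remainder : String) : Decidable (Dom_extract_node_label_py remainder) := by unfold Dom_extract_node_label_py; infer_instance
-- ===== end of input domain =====

-- B replaces A's table-driven while-loop (a scan over a list of six (open, close)
-- string pairs with a `matched` flag and for-else) by direct first/last-character
-- tests: a `_peel_once` step that pattern-matches the two double shapes and looks the
-- single delimiters up in a pair table, a recursive `_peel`, and `matched` recovered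
-- as `peeled != text` (alternative decomposition; same values).

-- strip never lengthens a string (used by both ports' termination proofs)
theorem pvStripLen (t : List Char) : (PySem.Chars.strip t).length ≤ t.length := by
  simp only [PySem.Chars.strip, PySem.Chars.rstrip, PySem.Chars.lstrip, List.length_reverse]
  calc (List.dropWhile PySem.Chars.isspace (List.dropWhile PySem.Chars.isspace t).reverse).length
      ≤ (List.dropWhile PySem.Chars.isspace t).reverse.length := List.length_dropWhile_le ..
    _ ≤ t.length := by simpa using List.length_dropWhile_le ..

-- ===== PORT A =====

-- A's local `shapes` list
def pvShapesA : List (List Char × List Char) :=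
  [(['[','['], [']',']']), (['(','('], [')',')']),
   (['['], [']']), (['('], [')']), (['{'], ['}']), (['<'], ['>'])]

-- A's inner `for start, end in shapes` scan: first matching shape yields the stripped slice
def pvForShapesA : List (List Char × List Char) → List Char → Option (List Char)
  | [], _ => none
  | (st, en) :: rest, t =>
    if PySem.Chars.startswith t st && PySem.Chars.endswith t en
        && decide (st.length + en.length ≤ t.length) then
      some (PySem.Chars.strip (PySem.Chars.slice t (some (st.length : Int)) (some (-(en.length : Int)))))
    else pvForShapesA rest t

theorem pvForShapesA_length {l : List (List Char × List Char)} {t t' : List Char}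
    (hl : ∀ p ∈ l, 1 ≤ p.1.length ∧ 1 ≤ p.2.length)
    (h : pvForShapesA l t = some t') : t'.length < t.length := by
  induction l with
  | nil => simp [pvForShapesA] at h
  | cons p rest ih =>
    obtain ⟨st, en⟩ := p
    by_cases hc : (PySem.Chars.startswith t st && PySem.Chars.endswith t en
        && decide (st.length + en.length ≤ t.length)) = true
    · simp only [pvForShapesA, hc, if_pos] at h
      have hst : 1 ≤ st.length := (hl _ (List.mem_cons_self ..)).1
      have hen : 1 ≤ en.length := (hl _ (List.mem_cons_self ..)).2
      have hlen : st.length + en.length ≤ t.length := by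
        simp only [Bool.and_eq_true, decide_eq_true_eq] at hc; exact hc.2
      have hslice : (PySem.Chars.slice t (some (st.length : Int)) (some (-(en.length : Int)))).length
          ≤ t.length - 2 := by
        rw [PySem.Chars.slice_eq_listSlice, PySem.List.length_slice,
          PySem.List.clampIdx_neg_natCast _ _ hen, PySem.List.clampIdx_natCast]
        omega
      have hstr := pvStripLen (PySem.Chars.slice t (some (st.length : Int)) (some (-(en.length : Int))))
      have hlenEq := congrArg List.length (Option.some.inj h)
      omega
    · rw [pvForShapesA, if_neg hc] at h
      exact ih (fun p hp => hl p (List.mem_cons_of_mem _ hp)) h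

theorem pvShapesA_pos : ∀ p ∈ pvShapesA, 1 ≤ p.1.length ∧ 1 ≤ p.2.length := by decide

-- A's `while True: … else: break` loop, threading the `matched` flag
def pvLoopA (t : List Char) (matched : Bool) : List Char × Bool :=
  match h : pvForShapesA pvShapesA t with
  | some t' => pvLoopA t' true
  | none => (t, matched)
termination_by t.length
decreasing_by exact pvForShapesA_length pvShapesA_pos h

def extract_node_label_py (remainder : String) : Option String :=
  if remainder.toList = [] then none
  else
    let text := PySem.Chars.strip remainder.toList
    if text = [] then none
    else
      let text := if PySem.Chars.isIn ":::".toList text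
        then PySem.Chars.strip ((PySem.Chars.splitOnMax text ":::".toList 1).headD [])
        else text
      let r := pvLoopA text false
      if r.2 = false then none
      else
        let t := if PySem.Chars.startswith r.1 ['"'] && PySem.Chars.endswith r.1 ['"']
            && decide (2 ≤ r.1.length)
          then PySem.Chars.strip (PySem.Chars.slice r.1 (some 1) (some (-1)))
          else r.1
        if t = [] then none else some (String.ofList t)

-- ===== PORT B =====

-- B's module-level `_PAIRS` table of single-character delimiters
def pvPairsB : List (Char × Char) := [('[',']'), ('(',')'), ('{','}'), ('<','>')]

-- B's `_peel_once`: strip one delimiter layer by direct first/last-character tests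
-- (s[:2]/s[-2:] for the double shapes, (s[0], s[-1]) looked up in _PAIRS)
def pvStepB (s : List Char) : Option (List Char) :=
  if 4 ≤ s.length ∧
      (PySem.List.slice s none (some 2), PySem.List.slice s (some (-2)) none) ∈
        ([((['[','[']), ([']',']'])), ((['(','(']), ([')',')']))] : List (List Char × List Char)) then
    some (PySem.Chars.strip (PySem.List.slice s (some 2) (some (-2))))
  else if 2 ≤ s.length ∧
      (PySem.List.pyGet? s 0, PySem.List.pyGet? s (-1)) ∈
        (pvPairsB.map fun p => (some p.1, some p.2)) then
    some (PySem.Chars.strip (PySem.List.slice s (some 1) (some (-1))))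
  else none

-- termination of B's peel: each successful step removes at least two characters
theorem pvStepB_length {s s' : List Char} (h : pvStepB s = some s') : s'.length < s.length := by
  unfold pvStepB at h
  split_ifs at h with h1 h2
  · obtain ⟨h4, -⟩ := h1
    have hs := pvStripLen (PySem.List.slice s (some 2) (some (-2)))
    have hc2 : PySem.List.clampIdx s.length (-2) = s.length - 2 :=
      PySem.List.clampIdx_neg_ofNat _ _ (by norm_num)
    have hc2' : PySem.List.clampIdx s.length 2 = min 2 s.length := by
      simp [PySem.List.clampIdx]
    have hl : (PySem.List.slice s (some 2) (some (-2))).length ≤ s.length - 4 := by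
      rw [PySem.List.length_slice, hc2, hc2']
      omega
    have := congrArg List.length (Option.some.inj h)
    omega
  · obtain ⟨h2', -⟩ := h2
    have hs := pvStripLen (PySem.List.slice s (some 1) (some (-1)))
    have hc1 : PySem.List.clampIdx s.length 1 = min 1 s.length := by
      simp [PySem.List.clampIdx]
    have hl : (PySem.List.slice s (some 1) (some (-1))).length ≤ s.length - 2 := by
      rw [PySem.List.length_slice, PySem.List.clampIdx_neg_one, hc1]
      omega
    have := congrArg List.length (Option.some.inj h)
    omega

-- B's recursive `_peel`
def pvPeelB (s : List Char) : List Char :=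
  match h : pvStepB s with
  | some s' => pvPeelB s'
  | none => s
termination_by s.length
decreasing_by exact pvStepB_length h

-- B's `_unquote`
def pvUnquoteB (s : List Char) : List Char :=
  if 2 ≤ s.length ∧ PySem.List.pyGet? s 0 = some '"' ∧ PySem.List.pyGet? s (-1) = some '"' then
    PySem.Chars.strip (PySem.List.slice s (some 1) (some (-1)))
  else s

def extract_node_label_py_alt (remainder : String) : Option String :=
  let text := PySem.Chars.strip remainder.toList
  if text = [] then none
  else
    let text := if PySem.Chars.isIn ":::".toList text
      then PySem.Chars.strip ((PySem.Chars.splitOnMax text ":::".toList 1).headD [])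
      else text
    let peeled := pvPeelB text
    if peeled = text then none
    else
      let peeled := pvUnquoteB peeled
      if peeled = [] then none else some (String.ofList peeled)

-- ===== PRECONDITION & SPEC =====
def Spec_extract_node_label_py (remainder : String) (out : Option String) : Prop := out = extract_node_label_py_alt remainder
instance (remainder : String) (out : Option String) : Decidable (Spec_extract_node_label_py remainder out) := by unfold Spec_extract_node_label_py; infer_instance

-- ===== CLAIM (what is proved, stated in full; the proofs are below) =====
def Claim_equal_extract_node_label_py : Prop := ∀ (remainder : String), Dom_extract_node_label_py remainder → Spec_extract_node_label_py remainder (extract_node_label_py remainder)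

-- ===== LEMMAS AND PROOFS =====

-- A's double-shape test (startswith/endswith/len) says exactly what B's slice comparisons say
theorem pvDouble_iff (s : List Char) (a b c d : Char) :
    (PySem.Chars.startswith s [a,b] && PySem.Chars.endswith s [c,d]
      && decide (([a,b] : List Char).length + ([c,d] : List Char).length ≤ s.length)) = true
    ↔ (4 ≤ s.length ∧ PySem.List.slice s none (some 2) = [a,b]
        ∧ PySem.List.slice s (some (-2)) none = [c,d]) := by
  have hto : PySem.List.slice s none (some 2) = s.take 2 := by
    rw [PySem.List.slice_to _ (by omega)]; rfl
  simp only [Bool.and_eq_true, decide_eq_true_eq, PySem.Chars.startswith_iff,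
    PySem.Chars.endswith_iff, List.length_cons, List.length_nil]
  constructor
  · rintro ⟨⟨hpre, hsuf⟩, hlen⟩
    refine ⟨by omega, ?_, ?_⟩
    · rw [hto]; exact (List.prefix_iff_eq_take.mp hpre).symm
    · rw [PySem.List.slice_from_neg_ofNat s 2 (by omega)]
      have := (List.suffix_iff_eq_drop.mp hsuf).symm
      simpa using this
  · rintro ⟨hlen, hpre, hsuf⟩
    rw [hto] at hpre
    rw [PySem.List.slice_from_neg_ofNat s 2 (by omega)] at hsuf
    refine ⟨⟨List.prefix_iff_eq_take.mpr hpre.symm, List.suffix_iff_eq_drop.mpr (by simpa using hsuf.symm)⟩, by omega⟩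

-- A's single-shape test says exactly what B's first/last-character test says
theorem pvSingle_iff (s : List Char) (a b : Char) :
    (PySem.Chars.startswith s [a] && PySem.Chars.endswith s [b]
      && decide (([a] : List Char).length + ([b] : List Char).length ≤ s.length)) = true
    ↔ (2 ≤ s.length ∧ PySem.List.pyGet? s 0 = some a ∧ PySem.List.pyGet? s (-1) = some b) := by
  have h0 : PySem.List.pyGet? s 0 = s[0]? := by simp [pysem]
  simp only [Bool.and_eq_true, decide_eq_true_eq, PySem.Chars.startswith_iff,
    PySem.Chars.endswith_iff, List.length_cons, List.length_nil]
  constructor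
  · rintro ⟨⟨hpre, hsuf⟩, hlen⟩
    refine ⟨by omega, ?_, ?_⟩
    · rw [h0]
      obtain ⟨t, rfl⟩ := hpre; rfl
    · rw [PySem.List.pyGet?_neg_ofNat s 1 (by omega) (by omega)]
      obtain ⟨t, rfl⟩ := hsuf
      simp
  · rintro ⟨hlen, hpre, hsuf⟩
    rw [h0] at hpre
    rw [PySem.List.pyGet?_neg_ofNat s 1 (by omega) (by omega)] at hsuf
    have hpre' : [a] <+: s := by
      cases s with
      | nil => simp at hpre
      | cons x xs => simp at hpre; exact ⟨xs, by simp [hpre]⟩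
    have hsuf' : [b] <:+ s := by
      rw [← List.getLast?_eq_getElem?] at hsuf
      obtain ⟨l, hl⟩ := (List.getLast?_eq_some_iff).mp hsuf
      exact ⟨l, hl.symm⟩
    exact ⟨⟨hpre', hsuf'⟩, by omega⟩

-- one peel step of B computes exactly one pass of A's shape scan
theorem pvStep_eq (s : List Char) : pvStepB s = pvForShapesA pvShapesA s := by
  by_cases hB1 : 4 ≤ s.length ∧
      (PySem.List.slice s none (some 2), PySem.List.slice s (some (-2)) none) ∈
        ([((['[','[']), ([']',']'])), ((['(','(']), ([')',')']))] : List (List Char × List Char))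
  · rw [pvStepB, if_pos hB1]
    obtain ⟨h4, hmem⟩ := hB1
    simp only [List.mem_cons, List.not_mem_nil, or_false, Prod.mk.injEq] at hmem
    rcases hmem with ⟨ha, hb⟩ | ⟨ha, hb⟩
    · have hA1 : (PySem.Chars.startswith s ['[','['] && PySem.Chars.endswith s [']',']']
          && decide ((['[','['] : List Char).length + ([']',']'] : List Char).length ≤ s.length)) = true :=
        (pvDouble_iff s '[' '[' ']' ']').mpr ⟨h4, ha, hb⟩
      simp only [pvShapesA, pvForShapesA, hA1, if_true]
      simp [PySem.Chars.slice_eq_listSlice]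
    · have hA1 : (PySem.Chars.startswith s ['[','['] && PySem.Chars.endswith s [']',']']
          && decide ((['[','['] : List Char).length + ([']',']'] : List Char).length ≤ s.length)) = false := by
        rw [Bool.eq_false_iff]
        intro hc
        obtain ⟨-, ha', -⟩ := (pvDouble_iff s '[' '[' ']' ']').mp hc
        rw [ha] at ha'
        simp at ha'
      have hA2 : (PySem.Chars.startswith s ['(','('] && PySem.Chars.endswith s [')',')']
          && decide ((['(','('] : List Char).length + ([')',')'] : List Char).length ≤ s.length)) = true :=
        (pvDouble_iff s '(' '(' ')' ')').mpr ⟨h4, ha, hb⟩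
      simp only [pvShapesA, pvForShapesA, hA1, hA2, if_true, Bool.false_eq_true, if_false]
      simp [PySem.Chars.slice_eq_listSlice]
  · rw [pvStepB, if_neg hB1]
    have hA1 : (PySem.Chars.startswith s ['[','['] && PySem.Chars.endswith s [']',']']
        && decide ((['[','['] : List Char).length + ([']',']'] : List Char).length ≤ s.length)) = false := by
      rw [Bool.eq_false_iff]
      intro hc
      obtain ⟨h4, ha, hb⟩ := (pvDouble_iff s '[' '[' ']' ']').mp hc
      exact hB1 ⟨h4, by simp [ha, hb]⟩
    have hA2 : (PySem.Chars.startswith s ['(','('] && PySem.Chars.endswith s [')',')']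
        && decide ((['(','('] : List Char).length + ([')',')'] : List Char).length ≤ s.length)) = false := by
      rw [Bool.eq_false_iff]
      intro hc
      obtain ⟨h4, ha, hb⟩ := (pvDouble_iff s '(' '(' ')' ')').mp hc
      exact hB1 ⟨h4, by simp [ha, hb]⟩
    by_cases hB2 : 2 ≤ s.length ∧
        (PySem.List.pyGet? s 0, PySem.List.pyGet? s (-1)) ∈
          (pvPairsB.map fun p => (some p.1, some p.2))
    · rw [if_pos hB2]
      obtain ⟨h2, hmem⟩ := hB2
      simp only [pvPairsB, List.map_cons, List.map_nil, List.mem_cons, List.not_mem_nil,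
        or_false, Prod.mk.injEq] at hmem
      have single_true : ∀ a b : Char, PySem.List.pyGet? s 0 = some a →
          PySem.List.pyGet? s (-1) = some b →
          (PySem.Chars.startswith s [a] && PySem.Chars.endswith s [b]
            && decide (([a] : List Char).length + ([b] : List Char).length ≤ s.length)) = true :=
        fun a b ha hb => (pvSingle_iff s a b).mpr ⟨h2, ha, hb⟩
      have single_false : ∀ a b : Char, PySem.List.pyGet? s 0 ≠ some a →
          (PySem.Chars.startswith s [a] && PySem.Chars.endswith s [b]
            && decide (([a] : List Char).length + ([b] : List Char).length ≤ s.length)) = false := by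
        intro a b ha
        rw [Bool.eq_false_iff]
        intro hc
        exact ha ((pvSingle_iff s a b).mp hc).2.1
      rcases hmem with ⟨ha, hb⟩ | ⟨ha, hb⟩ | ⟨ha, hb⟩ | ⟨ha, hb⟩
      · simp only [pvShapesA, pvForShapesA, hA1, hA2, single_true _ _ ha hb,
          Bool.false_eq_true, if_false, if_true]
        simp [PySem.Chars.slice_eq_listSlice]
      · simp only [pvShapesA, pvForShapesA, hA1, hA2, single_true _ _ ha hb,
          single_false '[' ']' (by rw [ha]; simp),
          Bool.false_eq_true, if_false, if_true]
        simp [PySem.Chars.slice_eq_listSlice]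
      · simp only [pvShapesA, pvForShapesA, hA1, hA2, single_true _ _ ha hb,
          single_false '[' ']' (by rw [ha]; simp),
          single_false '(' ')' (by rw [ha]; simp),
          Bool.false_eq_true, if_false, if_true]
        simp [PySem.Chars.slice_eq_listSlice]
      · simp only [pvShapesA, pvForShapesA, hA1, hA2, single_true _ _ ha hb,
          single_false '[' ']' (by rw [ha]; simp),
          single_false '(' ')' (by rw [ha]; simp),
          single_false '{' '}' (by rw [ha]; simp),
          Bool.false_eq_true, if_false, if_true]
        simp [PySem.Chars.slice_eq_listSlice]
    · rw [if_neg hB2]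
      have single_false : ∀ a b : Char, (a, b) ∈ pvPairsB →
          (PySem.Chars.startswith s [a] && PySem.Chars.endswith s [b]
            && decide (([a] : List Char).length + ([b] : List Char).length ≤ s.length)) = false := by
        intro a b hab
        rw [Bool.eq_false_iff]
        intro hc
        obtain ⟨h2, ha, hb⟩ := (pvSingle_iff s a b).mp hc
        exact hB2 ⟨h2, by
          rw [List.mem_map]
          exact ⟨(a, b), hab, by rw [ha, hb]⟩⟩
      simp only [pvShapesA, pvForShapesA, hA1, hA2,
        single_false '[' ']' (by simp [pvPairsB]),
        single_false '(' ')' (by simp [pvPairsB]),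
        single_false '{' '}' (by simp [pvPairsB]),
        single_false '<' '>' (by simp [pvPairsB]),
        Bool.false_eq_true, if_false]

-- A's trailing unquote equals B's `_unquote`
theorem pvUnquote_eq (r : List Char) :
    (if PySem.Chars.startswith r ['"'] && PySem.Chars.endswith r ['"'] && decide (2 ≤ r.length)
      then PySem.Chars.strip (PySem.Chars.slice r (some 1) (some (-1)))
      else r) = pvUnquoteB r := by
  have hq : (PySem.Chars.startswith r ['"'] && PySem.Chars.endswith r ['"']
      && decide (2 ≤ r.length)) = true
      ↔ (2 ≤ r.length ∧ PySem.List.pyGet? r 0 = some '"' ∧ PySem.List.pyGet? r (-1) = some '"') := by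
    have := pvSingle_iff r '"' '"'
    simpa using this
  unfold pvUnquoteB
  by_cases h : 2 ≤ r.length ∧ PySem.List.pyGet? r 0 = some '"' ∧ PySem.List.pyGet? r (-1) = some '"'
  · rw [if_pos (hq.mpr h), if_pos h, PySem.Chars.slice_eq_listSlice]
  · rw [if_neg (fun hc => h (hq.mp hc)), if_neg h]

theorem pvLoopA_of_some {t t' : List Char} {m : Bool}
    (h : pvForShapesA pvShapesA t = some t') : pvLoopA t m = pvLoopA t' true := by
  rw [pvLoopA]; split <;> simp_all

theorem pvLoopA_of_none {t : List Char} {m : Bool}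
    (h : pvForShapesA pvShapesA t = none) : pvLoopA t m = (t, m) := by
  rw [pvLoopA]; split <;> simp_all

theorem pvPeelB_of_some {s s' : List Char}
    (h : pvStepB s = some s') : pvPeelB s = pvPeelB s' := by
  rw [pvPeelB]; split <;> simp_all

theorem pvPeelB_of_none {s : List Char}
    (h : pvStepB s = none) : pvPeelB s = s := by
  rw [pvPeelB]; split <;> simp_all

theorem pvPeelB_length_le (s : List Char) : (pvPeelB s).length ≤ s.length := by
  induction s using pvPeelB.induct with
  | case1 s s' h ih =>
    rw [pvPeelB_of_some h]
    have := pvStepB_length h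
    omega
  | case2 s h => rw [pvPeelB_of_none h]

theorem pvLoopA_eq_peelB (t : List Char) (m : Bool) :
    pvLoopA t m = (pvPeelB t, m || decide (pvPeelB t ≠ t)) := by
  induction t, m using pvLoopA.induct with
  | case1 t m t' h ih =>
    have hB : pvStepB t = some t' := by rw [pvStep_eq]; exact h
    have hpeel : pvPeelB t = pvPeelB t' := pvPeelB_of_some hB
    have hlt : t'.length < t.length := pvForShapesA_length pvShapesA_pos h
    have hne : pvPeelB t ≠ t := by
      intro he
      have h1 := pvPeelB_length_le t'
      have h2 := congrArg List.length he
      rw [hpeel] at h2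
      omega
    rw [pvLoopA_of_some h, ih, ← hpeel]
    simp [hne]
  | case2 t m h =>
    have hB : pvStepB t = none := by rw [pvStep_eq]; exact h
    have hpeel : pvPeelB t = t := by rw [pvPeelB_of_none hB]
    rw [pvLoopA_of_none h, hpeel]
    simp

-- ===== VERDICT (by name: the statement is the Claim_ definition above) =====
theorem extract_node_label_py_spec : Claim_equal_extract_node_label_py := by
  intro remainder _
  unfold Spec_extract_node_label_py extract_node_label_py extract_node_label_py_alt
  by_cases h0 : remainder.toList = []
  · simp [h0, PySem.Chars.strip, PySem.Chars.rstrip, PySem.Chars.lstrip]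
  · simp only [h0, if_false]
    set text0 := PySem.Chars.strip remainder.toList with htext0
    by_cases h1 : text0 = []
    · simp [h1]
    · simp only [h1, if_false]
      set text := (if PySem.Chars.isIn ":::".toList text0
        then PySem.Chars.strip ((PySem.Chars.splitOnMax text0 ":::".toList 1).headD [])
        else text0) with htext
      rw [pvLoopA_eq_peelB]
      by_cases h2 : pvPeelB text = text
      · simp [h2]
      · simp only [h2, Bool.false_or, decide_eq_false_iff_not, not_not]
        rw [pvUnquote_eq]
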